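-- pv_equiv track=rewrite | github.com/shankargithubrep/elasticpocbuilder | src/ui/views/tabs/revenue_engine_tab.py | _get_semantic_suggestions
-- ===== SOURCE A (Python) =====
-- def _get_semantic_suggestions(partial: str) -> list:
--     partial_lower = partial.lower()
--     all_suggestions = [
--         {"text": "Build a shed — 10x12 Workshop", "category": "Project", "match_type": "semantic"},
--         {"text": "Build a deck — 12x16 Composite", "category": "Project", "match_type": "semantic"},
--         {"text": "Build a fence — 6ft Cedar Privacy", "category": "Project", "match_type": "semantic"},
--         {"text": "Build a pergola — 10x10 Freestanding", "category": "Project", "match_type": "semantic"},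
--         {"text": "Build a raised garden bed", "category": "Project", "match_type": "semantic"},
--         {"text": "Shed kit 10x12 prefab", "category": "Product", "match_type": "prefix"},
--         {"text": "Pressure treated lumber 2x4x8", "category": "Product", "match_type": "keyword"},
--         {"text": "OSB sheathing 4x8 sheet", "category": "Product", "match_type": "keyword"},
--     ]
--     if len(partial) < 3:
--         return []
--     keywords = partial_lower.split()
--     scored = []
--     for s in all_suggestions:
--         score = sum(1 for k in keywords if k in s["text"].lower())
--         if score > 0:
--             scored.append((score, s))
--     scored.sort(reverse=True, key=lambda x: x[0])
--     return [s for _, s in scored[:5]] or all_suggestions[:5]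
-- ===== SOURCE B (Python) =====
-- def _get_semantic_suggestions(partial: str) -> list:
--     all_suggestions = [
--         {"text": "Build a shed — 10x12 Workshop", "category": "Project", "match_type": "semantic"},
--         {"text": "Build a deck — 12x16 Composite", "category": "Project", "match_type": "semantic"},
--         {"text": "Build a fence — 6ft Cedar Privacy", "category": "Project", "match_type": "semantic"},
--         {"text": "Build a pergola — 10x10 Freestanding", "category": "Project", "match_type": "semantic"},
--         {"text": "Build a raised garden bed", "category": "Project", "match_type": "semantic"},
--         {"text": "Shed kit 10x12 prefab", "category": "Product", "match_type": "prefix"},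
--         {"text": "Pressure treated lumber 2x4x8", "category": "Product", "match_type": "keyword"},
--         {"text": "OSB sheathing 4x8 sheet", "category": "Product", "match_type": "keyword"},
--     ]
--     if len(partial) < 3:
--         return []
--     keywords = partial.lower().split()
--     scores = [sum(k in s["text"].lower() for k in keywords) for s in all_suggestions]
--     ranked = []
--     for want in range(len(keywords), 0, -1):  # highest score first; list order breaks ties
--         for s, got in zip(all_suggestions, scores):
--             if got == want:
--                 ranked.append(s)
--     return ranked[:5] or all_suggestions[:5]
-- ===== Notes on version B (the rewrite author's own statement) =====
-- stated objective: alternative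
-- what changed: Replaces building a (score, suggestion) list and stable reverse comparison sort with a distribution (bucket) ranking: scores are computed once, then the result is assembled by sweeping possible scores from the keyword count down to 1 and collecting the suggestions with that score in list order.
import Mathlib
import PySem

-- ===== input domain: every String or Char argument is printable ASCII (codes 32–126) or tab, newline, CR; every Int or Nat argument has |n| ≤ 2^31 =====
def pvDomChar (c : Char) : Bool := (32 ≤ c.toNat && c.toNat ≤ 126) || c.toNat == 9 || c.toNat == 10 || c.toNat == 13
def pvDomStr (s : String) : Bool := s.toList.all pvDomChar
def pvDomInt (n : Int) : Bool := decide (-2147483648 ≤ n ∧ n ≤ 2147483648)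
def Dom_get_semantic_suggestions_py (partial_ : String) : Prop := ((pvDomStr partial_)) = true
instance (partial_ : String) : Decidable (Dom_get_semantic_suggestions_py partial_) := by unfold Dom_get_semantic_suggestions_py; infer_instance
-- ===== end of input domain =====

-- B replaces the stable reverse comparison sort of a (score, suggestion) list by a distribution
-- (bucket) ranking: sweep possible scores from the keyword count down to 1, collecting matching
-- suggestions in list order (objective: alternative algorithm, same result).

-- ===== PORT A =====
-- s["text"]: first-match association-list lookup (the dict literals always carry the key)
def pvText (s : List (String × String)) : String := (PySem.Dict.mk s).getD "text" ""

-- the fixed suggestion table (a shared literal of both Python sources)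
def pvAllSuggestions : List (List (String × String)) :=
  [ [("text", "Build a shed — 10x12 Workshop"), ("category", "Project"), ("match_type", "semantic")],
    [("text", "Build a deck — 12x16 Composite"), ("category", "Project"), ("match_type", "semantic")],
    [("text", "Build a fence — 6ft Cedar Privacy"), ("category", "Project"), ("match_type", "semantic")],
    [("text", "Build a pergola — 10x10 Freestanding"), ("category", "Project"), ("match_type", "semantic")],
    [("text", "Build a raised garden bed"), ("category", "Project"), ("match_type", "semantic")],
    [("text", "Shed kit 10x12 prefab"), ("category", "Product"), ("match_type", "prefix")],
    [("text", "Pressure treated lumber 2x4x8"), ("category", "Product"), ("match_type", "keyword")],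
    [("text", "OSB sheathing 4x8 sheet"), ("category", "Product"), ("match_type", "keyword")] ]

def get_semantic_suggestions_py (partial_ : String) : List (List (String × String)) :=
  let partial_lower := PySem.Str.lower partial_
  let all_suggestions := pvAllSuggestions
  if PySem.Str.len partial_ < 3 then []
  else
    let keywords := PySem.Str.split₀ partial_lower
    let scored : List (Int × List (String × String)) := all_suggestions.foldl
      (fun scored s =>
        let score : Int := ((keywords.filter
          (fun k => PySem.Str.isIn k (PySem.Str.lower (pvText s)))).map
            (fun _ => (1 : Int))).sum
        if 0 < score then scored ++ [(score, s)] else scored) []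
    let sortedScored := PySem.List.sorted scored (fun x => x.1) true
    let result := (PySem.List.slice sortedScored none (some 5)).map (fun x => x.2)
    if result = [] then PySem.List.slice all_suggestions none (some 5) else result

-- ===== PORT B =====
def get_semantic_suggestions_py_alt (partial_ : String) : List (List (String × String)) :=
  let all_suggestions := pvAllSuggestions
  if PySem.Str.len partial_ < 3 then []
  else
    let keywords := PySem.Str.split₀ (PySem.Str.lower partial_)
    let scores : List Int := all_suggestions.map (fun s =>
      (keywords.map (fun k =>
        if PySem.Str.isIn k (PySem.Str.lower (pvText s)) then (1 : Int) else 0)).sum)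
    let ranked := (PySem.List.pyRange (keywords.length : Int) 0 (-1)).foldl
      (fun ranked want => (all_suggestions.zip scores).foldl
        (fun ranked sg => if sg.2 = want then ranked ++ [sg.1] else ranked) ranked) []
    let r := PySem.List.slice ranked none (some 5)
    if r = [] then PySem.List.slice all_suggestions none (some 5) else r

-- ===== PRECONDITION & SPEC =====
def Spec_get_semantic_suggestions_py (partial_ : String) (out : List (List (String × String))) : Prop := out = get_semantic_suggestions_py_alt partial_
instance (partial_ : String) (out : List (List (String × String))) : Decidable (Spec_get_semantic_suggestions_py partial_ out) := by unfold Spec_get_semantic_suggestions_py; infer_instance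

-- ===== CLAIM (what is proved, stated in full; the proofs are below) =====
def Claim_equal_get_semantic_suggestions_py : Prop := ∀ (partial_ : String), Dom_get_semantic_suggestions_py partial_ → Spec_get_semantic_suggestions_py partial_ (get_semantic_suggestions_py partial_)

-- ===== LEMMAS AND PROOFS =====

-- [K, K-1, …, 1]
def pvDescSeq : Nat → List Int
  | 0 => []
  | K + 1 => ((K : Int) + 1) :: pvDescSeq K

-- bucket decomposition: items with key K, then key K-1, …, then key 1, list order kept inside a bucket
def pvDescList {α : Type} (K : Nat) (xs : List (Int × α)) : List (Int × α) :=
  match K with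
  | 0 => []
  | K + 1 => xs.filter (fun p => decide (p.1 = (K : Int) + 1)) ++ pvDescList K xs

theorem pv_sum_ones {α : Type} (l : List α) : (l.map (fun _ => (1 : Int))).sum = l.length := by
  induction l with
  | nil => simp
  | cons a t ih => simp; omega

theorem pv_sum_bool {α : Type} (p : α → Bool) (l : List α) :
    (l.map (fun k => if p k then (1 : Int) else 0)).sum = ((l.filter p).length : Int) := by
  induction l with
  | nil => simp
  | cons a t ih => by_cases h : p a <;> simp [h, ih] <;> omega

theorem pv_scored_foldl {α : Type} (f : α → Int) (l : List α) (acc : List (Int × α)) :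
    l.foldl (fun acc s => if 0 < f s then acc ++ [(f s, s)] else acc) acc
      = acc ++ (l.filter (fun s => decide (0 < f s))).map (fun s => (f s, s)) := by
  induction l generalizing acc with
  | nil => simp
  | cons a t ih => by_cases h : 0 < f a <;> simp [h, ih]

theorem pv_inner_foldl {α : Type} (f : α → Int) (w : Int) (l : List α) (acc : List α) :
    (l.map (fun s => (s, f s))).foldl (fun acc sg => if sg.2 = w then acc ++ [sg.1] else acc) acc
      = acc ++ l.filter (fun s => decide (f s = w)) := by
  induction l generalizing acc with
  | nil => simp
  | cons a t ih => by_cases h : f a = w <;> simp [h, ih]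

theorem pv_zip_self {α β : Type} (g : α → β) (l : List α) :
    l.zip (l.map g) = l.map (fun s => (s, g s)) := by
  induction l with
  | nil => simp
  | cons a t ih => simp [ih]

theorem pv_range_map (K : Nat) :
    (List.range K).map (fun (k : Nat) => (K : Int) + (-1) * (k : Int)) = pvDescSeq K := by
  induction K with
  | zero => simp [pvDescSeq]
  | succ K ih =>
    rw [List.range_succ_eq_map, List.map_cons, List.map_map]
    rw [show ((fun (k : Nat) => ((K + 1 : Nat) : Int) + (-1) * (k : Int)) ∘ Nat.succ)
          = (fun (k : Nat) => (K : Int) + (-1) * (k : Int)) from by funext k; simp only [Function.comp]; push_cast; ring]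
    rw [ih]
    simp only [pvDescSeq]
    norm_num

theorem pv_range_desc (K : Nat) : PySem.List.pyRange (K : Int) 0 (-1) = pvDescSeq K := by
  cases K with
  | zero => rfl
  | succ K =>
    have h1 : ((0 : Int) < ((K + 1 : Nat) : Int)) := by push_cast; omega
    have h2 : ((((K + 1 : Nat) : Int) - 0 + -(-1) - 1) / -(-1)).toNat = K + 1 := by
      norm_num
    rw [show PySem.List.pyRange ((K + 1 : Nat) : Int) 0 (-1)
          = (List.range ((((K + 1 : Nat) : Int) - 0 + -(-1) - 1) / -(-1)).toNat).map
              (fun (k : Nat) => ((K + 1 : Nat) : Int) + (-1) * (k : Int)) from by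
        simp only [PySem.List.pyRange]
        norm_num]
    rw [h2, pv_range_map]

theorem pv_insertBy_cons {α : Type} (before : α → α → Bool) (x y : α) (ys : List α) :
    PySem.List.insertBy before x (y :: ys)
      = if before x y then x :: y :: ys else y :: PySem.List.insertBy before x ys := rfl

theorem pv_insertBy_append {α : Type} (before : α → α → Bool) (x : α) (A B : List α)
    (h : ∀ a ∈ A, before x a = false) :
    PySem.List.insertBy before x (A ++ B) = A ++ PySem.List.insertBy before x B := by
  induction A with
  | nil => simp
  | cons a t ih =>
    simp only [List.cons_append, pv_insertBy_cons, h a (by simp)]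
    simp [ih (fun b hb => h b (by simp [hb]))]

theorem pv_insertBy_head {α : Type} (before : α → α → Bool) (x : α) (B : List α)
    (h : ∀ b ∈ B.head?, before x b = true) :
    PySem.List.insertBy before x B = x :: B := by
  cases B with
  | nil => rfl
  | cons b t => simp [pv_insertBy_cons, h b (by simp)]

theorem pv_descList_nil {α : Type} (K : Nat) : pvDescList K ([] : List (Int × α)) = [] := by
  induction K with
  | zero => rfl
  | succ K ih => simp [pvDescList, ih]

theorem pv_descList_mem {α : Type} (K : Nat) (xs : List (Int × α)) (p : Int × α)
    (h : p ∈ pvDescList K xs) : p.1 ≤ (K : Int) := by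
  induction K with
  | zero => simp [pvDescList] at h
  | succ K ih =>
    simp only [pvDescList, List.mem_append, List.mem_filter, decide_eq_true_eq] at h
    rcases h with ⟨-, h⟩ | h
    · push_cast; omega
    · have := ih h; push_cast at this ⊢; omega

theorem pv_descList_snoc_skip {α : Type} (K : Nat) (x : Int × α) (xs : List (Int × α))
    (h : (K : Int) < x.1) : pvDescList K (xs ++ [x]) = pvDescList K xs := by
  induction K with
  | zero => rfl
  | succ K ih =>
    have hne : ¬ (x.1 = (K : Int) + 1) := by push_cast at h; omega
    simp only [pvDescList, List.filter_append, List.filter_cons, List.filter_nil]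
    rw [ih (by push_cast at h ⊢; omega)]
    simp [hne]

theorem pv_descList_insert {α : Type} (K : Nat) (x : Int × α) (xs : List (Int × α))
    (h1 : 1 ≤ x.1) (h2 : x.1 ≤ (K : Int)) :
    PySem.List.insertBy (fun a b => decide (b.1 < a.1)) x (pvDescList K xs)
      = pvDescList K (xs ++ [x]) := by
  induction K with
  | zero => simp at h2; omega
  | succ K ih =>
    simp only [pvDescList]
    by_cases hx : x.1 = (K : Int) + 1
    · -- x goes at the end of the top bucket
      rw [pv_insertBy_append _ _ _ _ (by
            intro a ha
            simp only [List.mem_filter, decide_eq_true_eq] at ha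
            simp only [decide_eq_false_iff_not, not_lt]
            omega),
          pv_insertBy_head _ _ _ (by
            intro b hb
            have hbK := pv_descList_mem K xs b (List.mem_of_mem_head? hb)
            simp only [decide_eq_true_eq]
            push_cast at hbK ⊢
            omega),
          pv_descList_snoc_skip K x xs (by omega),
          List.filter_append, List.filter_cons, List.filter_nil]
      simp [hx]
    · have hxK : x.1 ≤ (K : Int) := by push_cast at h2 ⊢; omega
      rw [pv_insertBy_append _ _ _ _ (by
            intro a ha
            simp only [List.mem_filter, decide_eq_true_eq] at ha
            simp only [decide_eq_false_iff_not, not_lt]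
            omega),
          ih hxK, List.filter_append, List.filter_cons, List.filter_nil]
      simp [hx]

theorem pv_sorted_descList {α : Type} (K : Nat) (xs : List (Int × α))
    (h : ∀ p ∈ xs, 1 ≤ p.1 ∧ p.1 ≤ (K : Int)) :
    PySem.List.sorted xs (fun p => p.1) true = pvDescList K xs := by
  induction xs using List.reverseRecOn with
  | nil => simp [PySem.List.sorted_eq_nil_iff, pv_descList_nil]
  | append_singleton xs x ih =>
    rw [PySem.List.sorted_rev_eq_foldl_insertBy, List.foldl_append, List.foldl_cons, List.foldl_nil,
      ← PySem.List.sorted_rev_eq_foldl_insertBy,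
      ih (fun p hp => h p (by simp [hp])),
      pv_descList_insert K x xs (h x (by simp)).1 (h x (by simp)).2]

theorem pv_filter_scored {α : Type} (f : α → Int) (w : Int) (hw : 1 ≤ w) (l : List α) :
    (((l.filter (fun s => decide (0 < f s))).map (fun s => (f s, s))).filter
        (fun p => decide (p.1 = w)))
      = (l.filter (fun s => decide (f s = w))).map (fun s => (f s, s)) := by
  induction l with
  | nil => simp
  | cons a t ih =>
    by_cases h : f a = w
    · have hw0 : (0 : Int) < w := by omega
      simp [h, hw0, ih]
    · by_cases h0 : 0 < f a <;> simp [h, h0, ih]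

theorem pv_descList_map_snd {α : Type} (f : α → Int) (l : List α) (K : Nat) :
    (pvDescList K ((l.filter (fun s => decide (0 < f s))).map (fun s => (f s, s)))).map Prod.snd
      = (pvDescSeq K).flatMap (fun w => l.filter (fun s => decide (f s = w))) := by
  induction K with
  | zero => simp [pvDescList, pvDescSeq]
  | succ K ih =>
    simp only [pvDescList, pvDescSeq, List.flatMap_cons, List.map_append, ih,
      pv_filter_scored f ((K : Int) + 1) (by omega) l]
    congr 1
    rw [List.map_map]
    exact List.map_id _

-- ===== VERDICT (by name: the statement is the Claim_ definition above) =====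
set_option maxHeartbeats 1000000 in
theorem get_semantic_suggestions_py_spec : Claim_equal_get_semantic_suggestions_py := by
  unfold Claim_equal_get_semantic_suggestions_py
  intro partial_ _
  unfold Spec_get_semantic_suggestions_py
  simp only [get_semantic_suggestions_py, get_semantic_suggestions_py_alt]
  by_cases hlen : PySem.Str.len partial_ < 3
  · rw [if_pos hlen, if_pos hlen]
  · rw [if_neg hlen, if_neg hlen]
    set ks := PySem.Str.split₀ (PySem.Str.lower partial_) with hks
    set ss := pvAllSuggestions with hss
    set f : List (String × String) → Int :=
      fun s => ((ks.filter (fun k => PySem.Str.isIn k (PySem.Str.lower (pvText s)))).length : Int)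
      with hf
    -- rewrite both score computations to f
    simp only [pv_sum_ones, pv_sum_bool]
    -- A's scored list as filter + map
    rw [pv_scored_foldl f ss []]
    -- B: zip of a list with its mapped scores, inner and outer folds
    rw [pv_zip_self f ss]
    simp only [pv_inner_foldl f]
    simp only [PySem.List.foldl_append_eq_flatMap]
    repeat rw [List.nil_append]
    rw [pv_range_desc ks.length]
    -- A: stable reverse sort = bucket decomposition
    rw [pv_sorted_descList ks.length _ (by
      intro p hp
      simp only [List.mem_map, List.mem_filter, decide_eq_true_eq] at hp
      obtain ⟨s, ⟨-, h0⟩, rfl⟩ := hp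
      refine ⟨?_, ?_⟩
      · show (1 : Int) ≤ f s
        omega
      · show f s ≤ (ks.length : Int)
        simp only [hf]
        exact_mod_cast List.length_filter_le _ _)]
    have h5 : ∀ {α : Type} (xs : List α),
        PySem.List.slice xs none (some 5) = xs.take (Int.toNat 5) :=
      fun xs => PySem.List.slice_to xs (by norm_num)
    simp only [h5]
    rw [List.map_take, pv_descList_map_snd f ss ks.length]
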